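-- pv_equiv track=rewrite | github.com/ivangalkindeveloper/Doglyad | DoglyadML/ner_research/dataset/generate.py | tag_entity
-- ===== SOURCE A (Python) =====
-- def tag_entity(tokens, entity_tokens, tag, existing_tags):
--     tags = existing_tags.copy()
--     for i in range(len(tokens) - len(entity_tokens) + 1):
--         if tokens[i:i + len(entity_tokens)] == entity_tokens:
--             can_tag = all(tags[i + j] == "O" for j in range(len(entity_tokens)))
--             if can_tag:
--                 tags[i] = f"B-{tag}"
--                 for j in range(1, len(entity_tokens)):
--                     tags[i + j] = f"I-{tag}"
--                 break  # Помечаем только первое вхождение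
--     return tags
-- ===== SOURCE B (Python) =====
-- def tag_entity(tokens, entity_tokens, tag, existing_tags):
--     if not entity_tokens:
--         return existing_tags.copy()
--     m = len(entity_tokens)
--     # prefix counts of already-occupied (non-"O") tag slots: O(1) window check later
--     busy = [0]
--     for t in existing_tags:
--         busy.append(busy[-1] + (t != "O"))
--     # narrow the candidate start positions column by column over the pattern
--     cand = list(range(len(tokens) - m + 1))
--     for j, e in enumerate(entity_tokens):
--         cand = [i for i in cand if tokens[i + j] == e]
--     # first full match whose tag window is entirely free
--     for i in cand:
--         if i + m <= len(existing_tags) and busy[i + m] == busy[i]: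
--             return (existing_tags[:i] + ["B-" + tag]
--                     + ["I-" + tag] * (m - 1) + existing_tags[i + m:])
--     return existing_tags.copy()
-- ===== Notes on version B (the rewrite author's own statement) =====
-- stated objective: alternative
-- what changed: B precomputes a prefix-sum table of occupied tag slots so the all-"O" window check is O(1) per candidate, and finds token matches by narrowing a candidate-start list column by column across the pattern (one filtering pass per pattern token) instead of A's per-position slice comparison with an inner per-element tag scan and in-place mutation; the result is rebuilt by slicing.
-- intended difference: On an empty entity_tokens with nonempty existing_tags A overwrites tags[0] with 'B-<tag>' (tagging a zero-length match); B returns existing_tags unchanged, the intended behaviour since there is no entity to tag. — e.g. on tag_entity([], [], "X", ["O"]): A returns ["B-X"], B returns ["O"]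
import Mathlib
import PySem

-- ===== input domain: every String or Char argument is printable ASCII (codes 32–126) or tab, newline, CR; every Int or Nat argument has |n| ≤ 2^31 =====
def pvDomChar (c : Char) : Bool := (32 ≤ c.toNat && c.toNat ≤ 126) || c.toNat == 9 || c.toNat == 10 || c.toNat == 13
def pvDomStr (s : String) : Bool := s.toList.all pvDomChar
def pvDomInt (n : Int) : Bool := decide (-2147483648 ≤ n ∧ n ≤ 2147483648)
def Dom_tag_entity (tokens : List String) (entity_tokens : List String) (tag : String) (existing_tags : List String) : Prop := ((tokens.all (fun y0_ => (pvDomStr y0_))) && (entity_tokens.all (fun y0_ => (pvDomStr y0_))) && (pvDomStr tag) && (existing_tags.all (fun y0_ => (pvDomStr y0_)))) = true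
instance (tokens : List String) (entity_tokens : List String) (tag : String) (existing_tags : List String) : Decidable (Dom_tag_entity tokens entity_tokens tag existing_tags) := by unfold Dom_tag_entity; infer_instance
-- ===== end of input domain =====

-- B replaces A's positional scan (slice comparison + inner per-element tag scan + in-place
-- mutation) by a prefix-sum table of occupied tag slots (O(1) window-free check) and a
-- candidate-start list narrowed column by column across the pattern; the result list is
-- rebuilt by slicing.  On the empty-entity corner A stamps "B-<tag>" on tags[0] while B
-- leaves the tags unchanged (see D_tag_entity below).  Return-value equivalence only:
-- neither program mutates its arguments.

-- ===== PORT A =====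
-- `all(tags[i + j] == "O" for j in range(k))` with short-circuit evaluation starting at
-- index `idx` (= i + j); `none` is exactly Python's IndexError.
def pvCanTag (tags : List String) (idx : Nat) : Nat → Option Bool
  | 0 => some true
  | k + 1 =>
    match PySem.List.pyGet? tags (idx : Int) with
    | none => none
    | some s => if s == "O" then pvCanTag tags (idx + 1) k else some false

-- A's `for i in range(...)` loop with its `break`.
def pvLoopA (tokens entity_tokens : List String) (tag : String) (tags : List String) : List Nat → List String
  | [] => tags
  | i :: rest =>
    if PySem.List.slice tokens (some (i : Int)) (some ((i : Int) + (entity_tokens.length : Int))) == entity_tokens then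
      match pvCanTag tags i entity_tokens.length with
      | some true =>
          -- tags[i] = "B-tag"; for j in range(1, m): tags[i+j] = "I-tag"  (range(1, m) = range' (i+1) (m-1), exact)
          List.foldl (fun l j => l.set j ("I-" ++ tag))
            (tags.set i ("B-" ++ tag)) (List.range' (i + 1) (entity_tokens.length - 1))
      | some false => pvLoopA tokens entity_tokens tag tags rest
      | none => tags   -- Python raises IndexError here; these inputs are outside Pre_tag_entity
    else pvLoopA tokens entity_tokens tag tags rest

def tag_entity (tokens : List String) (entity_tokens : List String) (tag : String) (existing_tags : List String) : List String :=
  -- range(len(tokens) - len(entity_tokens) + 1): empty when the bound is ≤ 0, hence .toNat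
  pvLoopA tokens entity_tokens tag existing_tags
    (List.range ((tokens.length : Int) - entity_tokens.length + 1).toNat)

-- ===== PORT B =====
-- `for t in existing_tags: busy.append(busy[-1] + (t != "O"))`; busy[-1] is pyGetD acc (-1)
def pvBusy (existing_tags : List String) : List Nat :=
  existing_tags.foldl
    (fun acc t => acc ++ [PySem.List.pyGetD acc (-1) 0 + (if t ≠ "O" then 1 else 0)]) [0]

-- `for j, e in enumerate(entity_tokens): cand = [i for i in cand if tokens[i + j] == e]`
def pvNarrow (tokens : List String) : Nat → List String → List Nat → List Nat
  | _, [], c => c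
  | j, e :: es, c => pvNarrow tokens (j + 1) es (c.filter (fun i => tokens.getD (i + j) "" == e))

def tag_entity_alt (tokens : List String) (entity_tokens : List String) (tag : String) (existing_tags : List String) : List String :=
  if entity_tokens = [] then existing_tags
  else
    let m := entity_tokens.length
    let busy := pvBusy existing_tags
    let cand := pvNarrow tokens 0 entity_tokens
      (List.range ((tokens.length : Int) - (m : Int) + 1).toNat)
    match cand.find? (fun i =>
        decide (i + m ≤ existing_tags.length) && (busy.getD (i + m) 0 == busy.getD i 0)) with
    | some i => existing_tags.take i ++ ["B-" ++ tag]
        ++ List.replicate (m - 1) ("I-" ++ tag) ++ existing_tags.drop (i + m)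
    | none => existing_tags

-- ===== PRECONDITION & SPEC =====
-- tokens[i:i+m] == entity_tokens
def pvMatchB (tokens entity_tokens : List String) (i : Nat) : Bool :=
  (tokens.drop i).take entity_tokens.length == entity_tokens

-- every tag slot A's generator can read at i without an IndexError holds "O"
def pvQB (tags : List String) (i m : Nat) : Bool :=
  (List.range m).all (fun j => if i + j < tags.length then tags.getD (i + j) "" == "O" else true)

def pvPB (tokens entity_tokens tags : List String) (i : Nat) : Bool :=
  pvMatchB tokens entity_tokens i && pvQB tags i entity_tokens.length

-- Pre_ excludes exactly the inputs on which A raises IndexError: an empty entity with an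
-- empty tag list, or a first match whose all-"O" check runs past the end of existing_tags.
def Pre_tag_entity (tokens : List String) (entity_tokens : List String) (tag : String) (existing_tags : List String) : Prop :=
  (entity_tokens = [] → existing_tags ≠ []) ∧
  ∀ i < ((tokens.length : Int) - entity_tokens.length + 1).toNat,
    pvPB tokens entity_tokens existing_tags i = true →
    (∀ i' < i, pvPB tokens entity_tokens existing_tags i' = false) →
    i + entity_tokens.length ≤ existing_tags.length

instance (tokens : List String) (entity_tokens : List String) (tag : String) (existing_tags : List String) : Decidable (Pre_tag_entity tokens entity_tokens tag existing_tags) := by unfold Pre_tag_entity; infer_instance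

def pvWitness_tag_entity : List String × List String × String × List String :=
  (["the", "big", "dog"], ["big", "dog"], "ANIMAL", ["O", "O", "O"])

-- On an empty entity_tokens with a nonempty tag list A returns existing_tags with slot 0
-- overwritten by "B-<tag>" (it "tags" a zero-length match); B returns existing_tags
-- unchanged, the intended behaviour since there is no entity to tag.
def D_tag_entity (tokens : List String) (entity_tokens : List String) (tag : String) (existing_tags : List String) : Prop :=
  entity_tokens = [] ∧ existing_tags ≠ [] ∧ existing_tags.headI ≠ "B-" ++ tag

instance (tokens : List String) (entity_tokens : List String) (tag : String) (existing_tags : List String) : Decidable (D_tag_entity tokens entity_tokens tag existing_tags) := by unfold D_tag_entity; infer_instance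

def Spec_tag_entity (tokens : List String) (entity_tokens : List String) (tag : String) (existing_tags : List String) (out : List String) : Prop := ¬ D_tag_entity tokens entity_tokens tag existing_tags → out = tag_entity_alt tokens entity_tokens tag existing_tags
instance (tokens : List String) (entity_tokens : List String) (tag : String) (existing_tags : List String) (out : List String) : Decidable (Spec_tag_entity tokens entity_tokens tag existing_tags out) := by unfold Spec_tag_entity; infer_instance

def pvDiffWitness_tag_entity : List String × List String × String × List String :=
  ([], [], "X", ["O"])

def pvDiffWitnessOut_tag_entity : (List String) × (List String) := (["B-X"], ["O"])

-- ===== CLAIM (what is proved, stated in full; the proofs are below) =====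
def Claim_unchanged_tag_entity : Prop := ∀ (tokens : List String) (entity_tokens : List String) (tag : String) (existing_tags : List String), Dom_tag_entity tokens entity_tokens tag existing_tags → Pre_tag_entity tokens entity_tokens tag existing_tags → Spec_tag_entity tokens entity_tokens tag existing_tags (tag_entity tokens entity_tokens tag existing_tags)
def Claim_changed_tag_entity : Prop := Dom_tag_entity (pvDiffWitness_tag_entity.1) (pvDiffWitness_tag_entity.2.1) (pvDiffWitness_tag_entity.2.2.1) (pvDiffWitness_tag_entity.2.2.2) ∧ Pre_tag_entity (pvDiffWitness_tag_entity.1) (pvDiffWitness_tag_entity.2.1) (pvDiffWitness_tag_entity.2.2.1) (pvDiffWitness_tag_entity.2.2.2) ∧ D_tag_entity (pvDiffWitness_tag_entity.1) (pvDiffWitness_tag_entity.2.1) (pvDiffWitness_tag_entity.2.2.1) (pvDiffWitness_tag_entity.2.2.2) ∧ tag_entity (pvDiffWitness_tag_entity.1) (pvDiffWitness_tag_entity.2.1) (pvDiffWitness_tag_entity.2.2.1) (pvDiffWitness_tag_entity.2.2.2) = pvDiffWitnessOut_tag_entity.1 ∧ tag_entity_alt (pvDiffWitness_tag_entity.1)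 (pvDiffWitness_tag_entity.2.1) (pvDiffWitness_tag_entity.2.2.1) (pvDiffWitness_tag_entity.2.2.2) = pvDiffWitnessOut_tag_entity.2 ∧ pvDiffWitnessOut_tag_entity.1 ≠ pvDiffWitnessOut_tag_entity.2
def Claim_exact_tag_entity : Prop := ∀ (tokens : List String) (entity_tokens : List String) (tag : String) (existing_tags : List String), Dom_tag_entity tokens entity_tokens tag existing_tags → Pre_tag_entity tokens entity_tokens tag existing_tags → D_tag_entity tokens entity_tokens tag existing_tags → tag_entity tokens entity_tokens tag existing_tags ≠ tag_entity_alt tokens entity_tokens tag existing_tags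

-- ===== LEMMAS AND PROOFS =====

-- the Nat-level predicate B's find? decides at position i
def pvPredN (tokens entity_tokens existing_tags : List String) (i : Nat) : Bool :=
  pvMatchB tokens entity_tokens i &&
    ((existing_tags.drop i).take entity_tokens.length == List.replicate entity_tokens.length "O")

-- the common shape of the tagged output
def pvTagOut (tag : String) (existing_tags : List String) (i m : Nat) : List String :=
  existing_tags.take i ++ ("B-" ++ tag) :: (List.replicate (m - 1) ("I-" ++ tag) ++ existing_tags.drop (i + m))

theorem pvQB_iff (tags : List String) (i m : Nat) :
    pvQB tags i m = true ↔ ∀ j < m, i + j < tags.length → tags.getD (i + j) "" = "O" := by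
  simp only [pvQB, List.all_eq_true, List.mem_range]
  constructor
  · intro h j hj hlt
    have := h j hj
    rw [if_pos hlt] at this
    simpa using this
  · intro h j hj
    by_cases hlt : i + j < tags.length
    · rw [if_pos hlt]; simpa using h j hj hlt
    · rw [if_neg hlt]

theorem pvCanTag_some_true (tags : List String) (k : Nat) : ∀ (i : Nat),
    pvCanTag tags i k = some true ↔
      ((tags.drop i).take k = List.replicate k "O" ∧ k ≤ tags.length - i) := by
  induction k with
  | zero => intro i; simp [pvCanTag]
  | succ k ih =>
    intro i
    rw [pvCanTag]
    rcases Nat.lt_or_ge i tags.length with hlt | hge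
    · have hg : PySem.List.pyGet? tags (i : Int) = some tags[i] := by
        simp [PySem.List.pyGet?_natCast, List.getElem?_eq_getElem hlt]
      rw [hg]
      have hdrop : tags.drop i = tags[i] :: tags.drop (i + 1) := by
        exact (List.getElem_cons_drop hlt).symm
      by_cases hO : tags[i] = "O"
      · simp only [hO, beq_self_eq_true, if_true]
        rw [ih (i + 1)]
        rw [hdrop, hO]
        simp only [List.take_succ_cons, List.replicate_succ]
        constructor
        · rintro ⟨h1, h2⟩
          exact ⟨by rw [h1], by omega⟩
        · rintro ⟨h1, h2⟩
          exact ⟨by injection h1, by omega⟩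
      · simp only [beq_iff_eq, hO, if_false]
        constructor
        · intro h; exact absurd h (by simp)
        · rintro ⟨h1, h2⟩
          rw [hdrop] at h1
          simp only [List.take_succ_cons, List.replicate_succ] at h1
          exact absurd (by injection h1) hO
    · have hg : PySem.List.pyGet? tags (i : Int) = none := by
        simp [PySem.List.pyGet?_natCast]
        omega
      rw [hg]
      constructor
      · intro h; exact absurd h (by simp)
      · rintro ⟨_, h2⟩; omega

theorem pvCanTag_none (tags : List String) (k : Nat) : ∀ (i : Nat),
    pvCanTag tags i k = none → ∀ j < k, i + j < tags.length → tags.getD (i + j) "" = "O" := by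
  induction k with
  | zero => intro i h j hj; omega
  | succ k ih =>
    intro i h j hj hlt
    rw [pvCanTag] at h
    rcases hg : PySem.List.pyGet? tags (i : Int) with _ | s
    · have : ¬ (i < tags.length) := by
        intro hc
        rw [PySem.List.pyGet?_natCast, List.getElem?_eq_getElem hc] at hg
        exact absurd hg (by simp)
      omega
    · rw [hg] at h
      have hi : i < tags.length := by
        by_contra hc
        rw [PySem.List.pyGet?_natCast, List.getElem?_eq_none_iff.mpr (by omega)] at hg
        exact absurd hg (by simp)
      have hs : s = tags[i] := by
        rw [PySem.List.pyGet?_natCast, List.getElem?_eq_getElem hi] at hg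
        injection hg with h'; exact h'.symm
      by_cases hO : s = "O"
      · simp only [hO, beq_self_eq_true, if_true] at h
        rcases Nat.eq_zero_or_pos j with hj0 | hjp
        · subst hj0
          simp [List.getD_eq_getElem?_getD, List.getElem?_eq_getElem hi, ← hs, hO]
        · have := ih (i + 1) h (j - 1) (by omega) (by omega)
          have hidx : i + 1 + (j - 1) = i + j := by omega
          rwa [hidx] at this
      · simp [hO] at h

theorem pvRepl_of_allO (l : List String) (i k : Nat) (hb : i + k ≤ l.length)
    (h : ∀ j < k, l.getD (i + j) "" = "O") :
    (l.drop i).take k = List.replicate k "O" := by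
  rw [List.eq_replicate_iff]
  constructor
  · simp; omega
  · intro b hb'
    rw [List.mem_iff_getElem] at hb'
    obtain ⟨j, hj, rfl⟩ := hb'
    have hj' : j < k := by simp [List.length_take, List.length_drop] at hj; omega
    have h1 : (List.take k (List.drop i l))[j] = l[i + j]'(by omega) := by
      simp [List.getElem_take, List.getElem_drop]
    rw [h1]
    have := h j hj'
    rwa [List.getD_eq_getElem?_getD, List.getElem?_eq_getElem (by omega), Option.getD_some] at this

theorem pvSets_eq (c : String) (k : Nat) : ∀ (l : List String) (s : Nat), s + k ≤ l.length →
    List.foldl (fun acc j => acc.set j c) l (List.range' s k)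
      = l.take s ++ List.replicate k c ++ l.drop (s + k) := by
  induction k with
  | zero => intro l s h; simp
  | succ k ih =>
    intro l s h
    rw [List.range'_succ, List.foldl_cons]
    have hs : s < l.length := by omega
    have hset : l.set s c = l.take s ++ c :: l.drop (s + 1) := by
      rw [List.set_eq_take_append_cons_drop, if_pos hs]
    rw [ih (l.set s c) (s + 1) (by simp; omega), hset]
    have hlen : (l.take s).length = s := by simp; omega
    have ht : (l.take s ++ c :: l.drop (s + 1)).take (s + 1) = l.take s ++ [c] := by
      rw [show s + 1 = (l.take s).length + 1 by omega, List.take_append]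
      simp
    have h0 : List.drop (s + 1 + k) (l.take s) = [] := List.drop_eq_nil_of_le (by simp; omega)
    have hd : (l.take s ++ c :: l.drop (s + 1)).drop (s + 1 + k) = l.drop (s + (k + 1)) := by
      rw [List.drop_append, hlen, h0, List.nil_append, show s + 1 + k - s = k + 1 by omega,
        List.drop_succ_cons, List.drop_drop]
      congr 1
      omega
    rw [ht, hd]
    simp [List.replicate_succ, List.append_assoc]

theorem pvFindR (p : Nat → Bool) (k : Nat) : ∀ (s i₀ : Nat), (List.range' s k).find? p = some i₀ →
    p i₀ = true ∧ ∀ j, s ≤ j → j < i₀ → p j = false := by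
  induction k with
  | zero => intro s i₀ h; simp at h
  | succ k ih =>
    intro s i₀ h
    rw [List.range'_succ, List.find?_cons] at h
    rcases hp : p s with _ | _
    · rw [hp] at h
      simp only [] at h
      obtain ⟨h1, h2⟩ := ih (s + 1) i₀ h
      refine ⟨h1, fun j hsj hji => ?_⟩
      rcases Nat.eq_or_lt_of_le hsj with rfl | hlt
      · exact hp
      · exact h2 j hlt hji
    · rw [hp] at h
      simp only [Option.some.injEq] at h
      subst h
      exact ⟨hp, fun j hsj hji => by omega⟩

theorem pvTagOut_eq_foldl (tag : String) (existing_tags : List String) (i m : Nat)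
    (hm : 1 ≤ m) (hb : i + m ≤ existing_tags.length) :
    List.foldl (fun l j => l.set j ("I-" ++ tag))
        (existing_tags.set i ("B-" ++ tag)) (List.range' (i + 1) (m - 1))
      = pvTagOut tag existing_tags i m := by
  have hi : i < existing_tags.length := by omega
  have hset : existing_tags.set i ("B-" ++ tag)
      = existing_tags.take i ++ ("B-" ++ tag) :: existing_tags.drop (i + 1) := by
    rw [List.set_eq_take_append_cons_drop, if_pos hi]
  rw [hset, pvSets_eq _ _ _ _ (by simp; omega)]
  have hlen : (existing_tags.take i).length = i := by simp; omega
  have ht : (existing_tags.take i ++ ("B-" ++ tag) :: existing_tags.drop (i + 1)).take (i + 1)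
      = existing_tags.take i ++ [("B-" ++ tag)] := by
    rw [show i + 1 = (existing_tags.take i).length + 1 by omega, List.take_append]
    simp
  have h0 : List.drop (i + 1 + (m - 1)) (existing_tags.take i) = [] :=
    List.drop_eq_nil_of_le (by simp; omega)
  have hd : (existing_tags.take i ++ ("B-" ++ tag) :: existing_tags.drop (i + 1)).drop (i + 1 + (m - 1))
      = existing_tags.drop (i + m) := by
    rw [List.drop_append, hlen, h0, List.nil_append, show i + 1 + (m - 1) - i = (m - 1) + 1 by omega,
      List.drop_succ_cons, List.drop_drop]
    congr 1
    omega
  rw [ht, hd, pvTagOut]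
  simp [List.append_assoc]

theorem pvLoopA_eq (tokens entity_tokens : List String) (tag : String) (existing_tags : List String)
    (hm : 1 ≤ entity_tokens.length) : ∀ (l : List Nat),
    (∀ i₀, l.find? (pvPB tokens entity_tokens existing_tags) = some i₀ →
        i₀ + entity_tokens.length ≤ existing_tags.length) →
    pvLoopA tokens entity_tokens tag existing_tags l =
      match l.find? (pvPredN tokens entity_tokens existing_tags) with
      | none => existing_tags
      | some i => pvTagOut tag existing_tags i entity_tokens.length := by
  intro l
  induction l with
  | nil => intro _; rfl
  | cons i rest ih =>
    intro H
    rw [pvLoopA, PySem.List.slice_natCast_add tokens i entity_tokens.length]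
    have hcond : ((tokens.drop i).take entity_tokens.length == entity_tokens)
        = pvMatchB tokens entity_tokens i := rfl
    by_cases hMatch : pvMatchB tokens entity_tokens i = true
    · rw [if_pos (by rw [hcond]; exact hMatch)]
      rcases hct : pvCanTag existing_tags i entity_tokens.length with _ | b
      · exfalso
        have hQ := pvCanTag_none existing_tags entity_tokens.length i hct
        have hP : pvPB tokens entity_tokens existing_tags i = true := by
          rw [pvPB, hMatch, Bool.true_and, pvQB_iff]
          exact hQ
        have hb := H i (by rw [List.find?_cons_of_pos hP])
        have := (pvCanTag_some_true existing_tags entity_tokens.length i).mpr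
          ⟨pvRepl_of_allO existing_tags i entity_tokens.length hb
            (fun j hj => hQ j hj (by omega)), by omega⟩
        rw [hct] at this
        exact absurd this (by simp)
      · rcases b with _ | _
        · have hPNf : pvPredN tokens entity_tokens existing_tags i = false := by
            rw [pvPredN, hMatch, Bool.true_and]
            rw [beq_eq_false_iff_ne]
            intro heq
            have hbnd : entity_tokens.length ≤ existing_tags.length - i := by
              have := congrArg List.length heq
              simp at this
              omega
            have := (pvCanTag_some_true existing_tags entity_tokens.length i).mpr ⟨heq, hbnd⟩
            rw [hct] at this
            exact absurd this (by simp)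
          have hPf : pvPB tokens entity_tokens existing_tags i = false := by
            rcases hP : pvPB tokens entity_tokens existing_tags i with _ | _
            · rfl
            · exfalso
              have hb := H i (by rw [List.find?_cons_of_pos hP])
              have hQ : ∀ j < entity_tokens.length, i + j < existing_tags.length →
                  existing_tags.getD (i + j) "" = "O" := by
                have := hP
                rw [pvPB, hMatch, Bool.true_and, pvQB_iff] at this
                exact this
              have := (pvCanTag_some_true existing_tags entity_tokens.length i).mpr
                ⟨pvRepl_of_allO existing_tags i entity_tokens.length hb
                  (fun j hj => hQ j hj (by omega)), by omega⟩
              rw [hct] at this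
              exact absurd this (by simp)
          rw [List.find?_cons_of_neg (by simp [hPNf])]
          exact ih (fun i₀ h₀ => H i₀ (by rw [List.find?_cons_of_neg (by simp [hPf])]; exact h₀))
        · obtain ⟨heq, hbnd⟩ := (pvCanTag_some_true existing_tags entity_tokens.length i).mp hct
          have hPN : pvPredN tokens entity_tokens existing_tags i = true := by
            rw [pvPredN, hMatch, Bool.true_and]
            exact beq_iff_eq.mpr heq
          rw [List.find?_cons_of_pos hPN]
          exact pvTagOut_eq_foldl tag existing_tags i entity_tokens.length hm (by omega)
    · have hMf : pvMatchB tokens entity_tokens i = false := by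
        rcases h : pvMatchB tokens entity_tokens i with _ | _
        · rfl
        · exact absurd h hMatch
      rw [if_neg (by rw [hcond, hMf]; simp)]
      have hPNf : pvPredN tokens entity_tokens existing_tags i = false := by
        rw [pvPredN, hMf, Bool.false_and]
      have hPf : pvPB tokens entity_tokens existing_tags i = false := by
        rw [pvPB, hMf, Bool.false_and]
      rw [List.find?_cons_of_neg (by simp [hPNf])]
      exact ih (fun i₀ h₀ => H i₀ (by rw [List.find?_cons_of_neg (by simp [hPf])]; exact h₀))

-- ===== B-side lemmas =====

def pvCountO (l : List String) : Nat := (l.filter (fun t => t ≠ "O")).length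

theorem pvBusy_eq (l : List String) :
    pvBusy l = (List.range (l.length + 1)).map (fun k => pvCountO (l.take k)) := by
  induction l using List.reverseRecOn with
  | nil => simp [pvBusy, pvCountO]
  | append_singleton l t ih =>
    unfold pvBusy at ih ⊢
    rw [List.foldl_append, List.foldl_cons, List.foldl_nil, ih]
    have h1 : (List.range (l.length + 1)).map (fun k => pvCountO (l.take k))
        = (List.range l.length).map (fun k => pvCountO (l.take k)) ++ [pvCountO l] := by
      rw [List.range_succ, List.map_append, List.map_singleton, List.take_length]
    have h2 : (List.range ((l ++ [t]).length + 1)).map (fun k => pvCountO ((l ++ [t]).take k))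
        = (List.range (l.length + 1)).map (fun k => pvCountO ((l ++ [t]).take k))
          ++ [pvCountO (l ++ [t])] := by
      rw [List.length_append, List.length_singleton, List.range_succ, List.map_append,
        List.map_singleton, List.take_of_length_le (by simp)]
    have h3 : (List.range (l.length + 1)).map (fun k => pvCountO ((l ++ [t]).take k))
        = (List.range (l.length + 1)).map (fun k => pvCountO (l.take k)) := by
      apply List.map_congr_left
      intro k hk
      rw [List.mem_range] at hk
      congr 1
      exact List.take_append_of_le_length (by omega)
    have h4 : pvCountO (l ++ [t]) = pvCountO l + (if t ≠ "O" then 1 else 0) := by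
      rw [pvCountO, pvCountO, List.filter_append, List.length_append]
      congr 1
      by_cases hO : t = "O" <;> simp [hO]
    rw [h2, h3, h1, PySem.List.pyGetD_neg_one_append_singleton, h4]

theorem pvBusy_getD (l : List String) (k : Nat) (hk : k ≤ l.length) :
    (pvBusy l).getD k 0 = pvCountO (l.take k) := by
  rw [pvBusy_eq, List.getD_eq_getElem?_getD, List.getElem?_map,
    List.getElem?_range (by omega)]
  rfl

theorem pvBusy_window (l : List String) (i m : Nat) (hb : i + m ≤ l.length) :
    (pvCountO (l.take (i + m)) = pvCountO (l.take i)) ↔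
      (l.drop i).take m = List.replicate m "O" := by
  rw [show l.take (i + m) = l.take i ++ (l.drop i).take m from List.take_add,
    pvCountO, pvCountO, List.filter_append, List.length_append]
  constructor
  · intro h
    have h0 : (((l.drop i).take m).filter (fun t => t ≠ "O")).length = 0 := by omega
    rw [List.length_eq_zero_iff, List.filter_eq_nil_iff] at h0
    rw [List.eq_replicate_iff]
    constructor
    · simp; omega
    · intro b hbmem
      have := h0 b hbmem
      simpa using this
  · intro h
    rw [h]
    have : (List.replicate m "O").filter (fun t => t ≠ "O") = [] := by
      rw [List.filter_eq_nil_iff]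
      intro a ha
      rw [List.eq_of_mem_replicate ha]
      simp
    rw [this]
    simp

-- the column predicate pvNarrow accumulates
def pvColsB (tokens : List String) (i : Nat) : Nat → List String → Bool
  | _, [] => true
  | j, e :: es => (tokens.getD (i + j) "" == e) && pvColsB tokens i (j + 1) es

theorem pvNarrow_eq (tokens : List String) (es : List String) : ∀ (j : Nat) (c : List Nat),
    pvNarrow tokens j es c = c.filter (fun i => pvColsB tokens i j es) := by
  induction es with
  | nil => intro j c; simp [pvNarrow, pvColsB]
  | cons e es ih =>
    intro j c
    rw [pvNarrow, ih (j + 1), List.filter_filter]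
    apply List.filter_congr
    intro i _
    rw [pvColsB, Bool.and_comm]

theorem pvColsB_eq_match (tokens : List String) (i : Nat) :
    ∀ (es : List String) (j : Nat), i + j + es.length ≤ tokens.length →
    pvColsB tokens i j es = ((tokens.drop (i + j)).take es.length == es) := by
  intro es
  induction es with
  | nil => intro j _; simp [pvColsB]
  | cons e es ih =>
    intro j hb
    have hlt : i + j < tokens.length := by simp at hb; omega
    have hdrop : tokens.drop (i + j) = tokens[i + j] :: tokens.drop (i + j + 1) :=
      (List.getElem_cons_drop hlt).symm
    have hgd : tokens.getD (i + j) "" = tokens[i + j] := by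
      rw [List.getD_eq_getElem?_getD, List.getElem?_eq_getElem hlt, Option.getD_some]
    rw [pvColsB, hgd, hdrop, List.length_cons, List.take_succ_cons, List.cons_beq_cons]
    congr 1
    have := ih (j + 1) (by simp at hb ⊢; omega)
    rw [show i + (j + 1) = i + j + 1 by omega] at this
    exact this

theorem pvFind?_congr_mem {α : Type} (p q : α → Bool) : ∀ (l : List α),
    (∀ a ∈ l, p a = q a) → l.find? p = l.find? q := by
  intro l
  induction l with
  | nil => intro _; rfl
  | cons a l ih =>
    intro h
    rw [List.find?_cons, List.find?_cons, h a List.mem_cons_self,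
      ih (fun b hb => h b (List.mem_cons_of_mem _ hb))]

theorem pvAlt_eq (tokens : List String) (e0 : String) (es : List String) (tag : String)
    (existing_tags : List String) :
    tag_entity_alt tokens (e0 :: es) tag existing_tags =
      match (List.range ((tokens.length : Int) - (e0 :: es).length + 1).toNat).find?
          (pvPredN tokens (e0 :: es) existing_tags) with
      | none => existing_tags
      | some i => pvTagOut tag existing_tags i (e0 :: es).length := by
  unfold tag_entity_alt
  rw [if_neg (by simp)]
  dsimp only
  rw [pvNarrow_eq, List.find?_filter]
  have hfind :
      (List.range ((tokens.length : Int) - ((e0 :: es).length : Int) + 1).toNat).find?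
        (fun i => decide (pvColsB tokens i 0 (e0 :: es) = true ∧
            (decide (i + (e0 :: es).length ≤ existing_tags.length) &&
              ((pvBusy existing_tags).getD (i + (e0 :: es).length) 0 ==
                (pvBusy existing_tags).getD i 0)) = true))
      = (List.range ((tokens.length : Int) - (e0 :: es).length + 1).toNat).find?
          (pvPredN tokens (e0 :: es) existing_tags) := by
    apply pvFind?_congr_mem
    intro i hi
    rw [List.mem_range] at hi
    rw [show (decide (pvColsB tokens i 0 (e0 :: es) = true ∧
            (decide (i + (e0 :: es).length ≤ existing_tags.length) &&
              ((pvBusy existing_tags).getD (i + (e0 :: es).length) 0 ==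
                (pvBusy existing_tags).getD i 0)) = true) : Bool)
        = ((decide (i + (e0 :: es).length ≤ existing_tags.length) &&
              ((pvBusy existing_tags).getD (i + (e0 :: es).length) 0 ==
                (pvBusy existing_tags).getD i 0)) && pvColsB tokens i 0 (e0 :: es)) from by
      rcases hA : pvColsB tokens i 0 (e0 :: es) with _ | _ <;>
        rcases hB : (decide (i + (e0 :: es).length ≤ existing_tags.length) &&
              ((pvBusy existing_tags).getD (i + (e0 :: es).length) 0 ==
                (pvBusy existing_tags).getD i 0)) with _ | _ <;> simp [hA, hB]]
    have hbT : i + (e0 :: es).length ≤ tokens.length := by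
      simp only [List.length_cons] at hi ⊢
      omega
    have hcols : pvColsB tokens i 0 (e0 :: es)
        = ((tokens.drop i).take (e0 :: es).length == (e0 :: es)) := by
      have := pvColsB_eq_match tokens i (e0 :: es) 0 (by omega)
      simpa using this
    rw [hcols, pvPredN, pvMatchB, Bool.and_comm]
    congr 1
    -- the free-window test equals the replicate slice test
    by_cases hbnd : i + (e0 :: es).length ≤ existing_tags.length
    · rw [decide_eq_true hbnd, Bool.true_and,
        pvBusy_getD existing_tags _ hbnd, pvBusy_getD existing_tags i (by omega)]
      rcases h : ((existing_tags.drop i).take (e0 :: es).length ==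
          List.replicate (e0 :: es).length "O") with _ | _
      · rw [beq_eq_false_iff_ne]
        intro hc
        rw [beq_eq_false_iff_ne] at h
        exact h ((pvBusy_window existing_tags i (e0 :: es).length hbnd).mp hc)
      · rw [beq_iff_eq] at h ⊢
        exact (pvBusy_window existing_tags i (e0 :: es).length hbnd).mpr h
    · rw [decide_eq_false hbnd, Bool.false_and, Eq.comm, beq_eq_false_iff_ne]
      intro hc
      have hlen := congrArg List.length hc
      rw [List.length_take, List.length_drop, List.length_replicate] at hlen
      have hmle : (e0 :: es).length ≤ existing_tags.length - i := by
        rcases Nat.le_total ((e0 :: es).length) (existing_tags.length - i) with h' | h'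
        · exact h'
        · rw [Nat.min_eq_right h'] at hlen
          omega
      simp only [List.length_cons] at hmle hbnd
      omega
  rw [hfind]
  rcases (List.range ((tokens.length : Int) - (e0 :: es).length + 1).toNat).find?
      (pvPredN tokens (e0 :: es) existing_tags) with _ | i
  · rfl
  · simp [pvTagOut, List.append_assoc]

theorem pvA_nil (tokens : List String) (tag : String) (h0 : String) (tl : List String) :
    tag_entity tokens [] tag (h0 :: tl) = ("B-" ++ tag) :: tl := by
  rw [tag_entity, show ((tokens.length : Int) - (List.length ([] : List String)) + 1).toNat
      = tokens.length + 1 by simp, List.range_eq_range', List.range'_succ, pvLoopA]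
  rw [show PySem.List.slice tokens (some ((0 : Nat) : Int))
      (some (((0 : Nat) : Int) + ((List.length ([] : List String)) : Int))) = ([] : List String) by
    rw [PySem.List.slice_natCast_add]
    simp]
  rw [if_pos (by simp)]
  simp [pvCanTag]

theorem pvFindRange (p : Nat → Bool) (K i₀ : Nat) (h : (List.range K).find? p = some i₀) :
    p i₀ = true ∧ i₀ < K ∧ ∀ j < i₀, p j = false := by
  have hmem : i₀ ∈ List.range K := List.mem_of_find?_eq_some h
  rw [List.range_eq_range'] at h
  obtain ⟨h1, h2⟩ := pvFindR p K 0 i₀ h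
  exact ⟨h1, List.mem_range.mp hmem, fun j hj => h2 j (Nat.zero_le j) hj⟩

-- ===== VERDICT =====
theorem tag_entity_spec : Claim_unchanged_tag_entity := by
  intro tokens entity_tokens tag existing_tags _ hpre
  intro hD
  rcases entity_tokens with _ | ⟨e0, es⟩
  · -- empty entity: Pre_ forces existing_tags ≠ [], ¬D_ forces its head to be "B-"++tag
    have hne := hpre.1 rfl
    rcases existing_tags with _ | ⟨h0, tl⟩
    · exact absurd rfl hne
    · have hhead : h0 = "B-" ++ tag := by
        by_contra hc
        exact hD ⟨rfl, by simp, by simpa using hc⟩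
      rw [pvA_nil, tag_entity_alt, if_pos rfl, hhead]
  · have hm : 1 ≤ (e0 :: es).length := by simp
    rw [pvAlt_eq, tag_entity]
    exact pvLoopA_eq tokens (e0 :: es) tag existing_tags hm _
      (fun i₀ h₀ => by
        obtain ⟨hp, hlt, hmin⟩ := pvFindRange _ _ _ h₀
        exact hpre.2 i₀ hlt hp hmin)

theorem tag_entity_changed : Claim_changed_tag_entity := by
  unfold Claim_changed_tag_entity; decide

theorem tag_entity_tight : Claim_exact_tag_entity := by
  intro tokens entity_tokens tag existing_tags _ _ hD
  obtain ⟨hE, hne, hhead⟩ := hD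
  subst hE
  rcases existing_tags with _ | ⟨h0, tl⟩
  · exact absurd rfl hne
  · rw [pvA_nil, tag_entity_alt, if_pos rfl]
    intro heq
    have : "B-" ++ tag = h0 := by injection heq
    exact hhead (by simpa using this.symm)
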